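-- pv_equiv track=rewrite | github.com/kamahen/pykythe | test_data/c3_a.py | find_merge_candidates_among_seq_heads
-- ===== SOURCE A (Python) =====
-- def find_merge_candidates_among_seq_heads(seqs):
--     if not seqs:
--         return None
--     cand = seqs[0][0]
--     if any(cand in s[1:] for s in seqs):
--         return find_merge_candidates_among_seq_heads(seqs[1:])
--     else:
--         return cand
-- ===== SOURCE B (Python) =====
-- def find_merge_candidates_among_seq_heads(seqs):
--     # Build, back to front, the union of tail elements of each suffix seqs[i:],
--     # then scan once: return the first head absent from its suffix tail-union.
--     sufs = []
--     tails = set()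
--     for s in reversed(seqs):
--         tails = tails | set(s[1:])
--         sufs.append(tails)
--     sufs.reverse()
--     for s, suf in zip(seqs, sufs):
--         if s[0] not in suf:
--             return s[0]
--     return None
-- ===== Notes on version B (the rewrite author's own statement) =====
-- stated objective: alternative
-- what changed: Replaces A's recursion that rescans every remaining sequence's tail for each candidate head with suffix tail-union sets precomputed back-to-front once, followed by a single membership scan over the heads.
import Mathlib
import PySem

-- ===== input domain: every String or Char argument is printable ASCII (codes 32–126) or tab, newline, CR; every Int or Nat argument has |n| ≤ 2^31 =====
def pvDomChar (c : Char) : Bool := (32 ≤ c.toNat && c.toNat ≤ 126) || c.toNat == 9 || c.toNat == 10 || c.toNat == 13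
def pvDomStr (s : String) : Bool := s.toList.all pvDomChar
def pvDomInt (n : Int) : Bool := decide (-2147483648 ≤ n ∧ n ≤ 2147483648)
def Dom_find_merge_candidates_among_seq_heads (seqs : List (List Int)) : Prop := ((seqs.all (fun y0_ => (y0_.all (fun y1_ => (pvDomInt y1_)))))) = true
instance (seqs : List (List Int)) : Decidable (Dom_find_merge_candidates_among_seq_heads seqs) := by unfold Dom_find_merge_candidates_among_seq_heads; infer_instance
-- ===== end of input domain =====

-- B precomputes the suffix tail-union sets back-to-front and then scans the heads once,
-- instead of A's recursion that re-scans every remaining tail for each candidate head.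

-- ===== PORT A =====
def find_merge_candidates_among_seq_heads : List (List Int) → Option Int
  | [] => none
  | (s0 :: rest) =>
    match PySem.List.pyGet? s0 0 with          -- seqs[0][0]; none = IndexError (outside Pre_)
    | none => none
    | some cand =>
      if (s0 :: rest).any (fun s => (PySem.List.slice s (some 1) none).contains cand) then
        find_merge_candidates_among_seq_heads rest
      else some cand

-- ===== PORT B =====
-- first loop of Source B: fold over reversed(seqs), state (tails, sufs)
def pvStep (acc : PySem.Set Int × List (PySem.Set Int)) (s : List Int) :
    PySem.Set Int × List (PySem.Set Int) :=
  let tails := PySem.Set.union acc.1 (PySem.List.slice s (some 1) none)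
  (tails, acc.2 ++ [tails])

def pvFold (seqs : List (List Int)) : PySem.Set Int × List (PySem.Set Int) :=
  seqs.reverse.foldl pvStep (PySem.Set.empty, [])

def pvBuild (seqs : List (List Int)) : List (PySem.Set Int) :=
  (pvFold seqs).2.reverse                      -- sufs.reverse()

-- second loop of Source B: scan zip(seqs, sufs)
def pvScan : List (List Int × PySem.Set Int) → Option Int
  | [] => none
  | ((s, suf) :: rest) =>
    match PySem.List.pyGet? s 0 with           -- s[0]; none = IndexError (outside Pre_)
    | none => none
    | some h => if PySem.Set.contains suf h then pvScan rest else some h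

def find_merge_candidates_among_seq_heads_alt (seqs : List (List Int)) : Option Int :=
  pvScan (seqs.zip (pvBuild seqs))

-- ===== PRECONDITION & SPEC =====
-- Pre_ excludes exactly the inputs on which A raises IndexError: the scan reaches an
-- empty sequence before finding a head absent from its suffix tail-union (B raises there too).
def Pre_find_merge_candidates_among_seq_heads (seqs : List (List Int)) : Prop :=
  ∀ i < seqs.length, seqs.getD i [] = [] →
    ∃ j < i, seqs.getD j [] ≠ [] ∧
      (seqs.getD j []).headI ∉ (seqs.drop j).flatMap (fun s => s.drop 1)
instance (seqs : List (List Int)) : Decidable (Pre_find_merge_candidates_among_seq_heads seqs) := by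
  unfold Pre_find_merge_candidates_among_seq_heads; infer_instance
def pvWitness_find_merge_candidates_among_seq_heads : List (List Int) := [[1, 2], [2]]

def Spec_find_merge_candidates_among_seq_heads (seqs : List (List Int)) (out : Option Int) : Prop := out = find_merge_candidates_among_seq_heads_alt seqs
instance (seqs : List (List Int)) (out : Option Int) : Decidable (Spec_find_merge_candidates_among_seq_heads seqs out) := by unfold Spec_find_merge_candidates_among_seq_heads; infer_instance

-- ===== CLAIM (what is proved, stated in full; the proofs are below) =====
def Claim_equal_find_merge_candidates_among_seq_heads : Prop := ∀ (seqs : List (List Int)), Dom_find_merge_candidates_among_seq_heads seqs → Pre_find_merge_candidates_among_seq_heads seqs → Spec_find_merge_candidates_among_seq_heads seqs (find_merge_candidates_among_seq_heads seqs)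

-- ===== LEMMAS AND PROOFS =====

theorem pvFold_cons (s : List Int) (rest : List (List Int)) :
    pvFold (s :: rest) = pvStep (pvFold rest) s := by
  simp [pvFold, List.foldl_append]

theorem mem_pvFold_one (seqs : List (List Int)) (x : Int) :
    x ∈ (pvFold seqs).1 ↔ x ∈ seqs.flatMap (fun s => s.drop 1) := by
  induction seqs with
  | nil => simp [pvFold, PySem.Set.empty]
  | cons s rest ih =>
    rw [pvFold_cons]
    simp [pvStep, PySem.Set.mem_union, PySem.List.slice_from_one, ih]
    exact or_comm

theorem pvBuild_cons (s : List Int) (rest : List (List Int)) :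
    pvBuild (s :: rest) =
      PySem.Set.union (pvFold rest).1 (PySem.List.slice s (some 1) none) :: pvBuild rest := by
  simp [pvBuild, pvFold_cons, pvStep]

theorem pv_main : ∀ seqs : List (List Int),
    Pre_find_merge_candidates_among_seq_heads seqs →
    find_merge_candidates_among_seq_heads seqs =
      find_merge_candidates_among_seq_heads_alt seqs := by
  intro seqs
  induction seqs with
  | nil => intro _; rfl
  | cons s rest ih =>
    intro pre
    have hs : s ≠ [] := by
      intro h
      obtain ⟨j, hj, _⟩ := pre 0 (by simp) (by simp [h])
      omega
    obtain ⟨h0, t, rfl⟩ : ∃ h0 t, s = h0 :: t := by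
      cases s with
      | nil => exact absurd rfl hs
      | cons a b => exact ⟨a, b, rfl⟩
    have hget : PySem.List.pyGet? (h0 :: t) (0 : Int) = some h0 := PySem.List.pyGet?_zero_cons _ _
    -- the two branch conditions agree
    have hcond :
        ((h0 :: t) :: rest).any
            (fun s' => (PySem.List.slice s' (some 1) none).contains h0) =
          PySem.Set.contains
            (PySem.Set.union (pvFold rest).1 (PySem.List.slice (h0 :: t) (some 1) none)) h0 := by
      rw [Bool.eq_iff_iff]
      simp only [List.any_eq_true, PySem.Set.contains_iff,
        PySem.Set.mem_union, mem_pvFold_one, PySem.List.slice_from_one]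
      constructor
      · rintro ⟨s', hs', hmem⟩
        rcases List.mem_cons.mp hs' with rfl | hs'
        · right; simpa using hmem
        · left
          simp only [List.mem_flatMap]
          exact ⟨s', hs', by simpa using hmem⟩
      · rintro (hmem | hmem)
        · simp only [List.mem_flatMap] at hmem
          obtain ⟨s', hs', hm⟩ := hmem
          exact ⟨s', List.mem_cons.mpr (Or.inr hs'), by simpa using hm⟩
        · exact ⟨h0 :: t, List.mem_cons_self, by simpa using hmem⟩
    rw [show find_merge_candidates_among_seq_heads ((h0 :: t) :: rest) =
        (if ((h0 :: t) :: rest).any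
              (fun s' => (PySem.List.slice s' (some 1) none).contains h0) then
            find_merge_candidates_among_seq_heads rest
          else some h0) from by rw [find_merge_candidates_among_seq_heads, hget]]
    rw [show find_merge_candidates_among_seq_heads_alt ((h0 :: t) :: rest) =
        (if PySem.Set.contains
              (PySem.Set.union (pvFold rest).1 (PySem.List.slice (h0 :: t) (some 1) none)) h0 then
            pvScan (rest.zip (pvBuild rest))
          else some h0) from by
      rw [find_merge_candidates_among_seq_heads_alt, pvBuild_cons, List.zip_cons_cons, pvScan, hget]]
    rw [hcond]
    by_cases hb : PySem.Set.contains
        (PySem.Set.union (pvFold rest).1 (PySem.List.slice (h0 :: t) (some 1) none)) h0 = true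
    · rw [if_pos hb, if_pos hb]
      -- Pre_ holds for rest
      have hmemflat : h0 ∈ ((h0 :: t) :: rest).flatMap (fun s => s.drop 1) := by
        have := hb
        simp only [PySem.Set.contains_iff, PySem.Set.mem_union, mem_pvFold_one,
          PySem.List.slice_from_one] at this
        rcases this with hm | hm
        · simp only [List.mem_flatMap] at hm ⊢
          obtain ⟨s', hs', h'⟩ := hm
          exact ⟨s', List.mem_cons_of_mem _ hs', h'⟩
        · simp only [List.mem_flatMap]
          exact ⟨h0 :: t, List.mem_cons_self, by simpa using hm⟩
      have pre' : Pre_find_merge_candidates_among_seq_heads rest := by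
        intro i hi hemp
        obtain ⟨j, hj, hne, hnm⟩ :=
          pre (i + 1) (by simpa using Nat.succ_lt_succ hi) (by simpa using hemp)
        cases j with
        | zero =>
          exact absurd (by simpa using hmemflat) (by simpa using hnm)
        | succ j' =>
          refine ⟨j', by omega, by simpa using hne, ?_⟩
          simpa using hnm
      exact ih pre'
    · rw [if_neg hb, if_neg hb]

-- ===== VERDICT (by name: the statement is the Claim_ definition above) =====
theorem find_merge_candidates_among_seq_heads_spec : Claim_equal_find_merge_candidates_among_seq_heads := by
  intro seqs _ pre
  exact pv_main seqs pre
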